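-- pv_equiv track=rewrite | github.com/Kjoon97/Algorithm | boj/IT/비밀번호 발음하기.py | count_m
-- ===== SOURCE A (Python) =====
-- def count_m(str):
--     cnt =0
--     for c in str:
--         if cnt>=3:
--             return cnt
--         if c in ['a','e','i','o','u']:
--             cnt+=1
--         else:
--             cnt=0
--
--     return cnt
-- ===== SOURCE B (Python) =====
-- def count_m(str):
--     vowels = set('aeiou')
--     if any(c1 in vowels and c2 in vowels and c3 in vowels
--            for c1, c2, c3 in zip(str, str[1:], str[2:])):
--         return 3
--     tail = 0
--     for c in reversed(str):
--         if c in vowels: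
--             tail += 1
--         else:
--             break
--     return tail
-- ===== Notes on version B (the rewrite author's own statement) =====
-- stated objective: alternative
-- what changed: Replaced the single stateful counter loop (early-exit at 3) by two independent passes: a window scan over consecutive character triples that detects any run of three vowels (returning the cap 3), and otherwise a backwards scan counting the trailing vowel run.
import Mathlib
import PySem

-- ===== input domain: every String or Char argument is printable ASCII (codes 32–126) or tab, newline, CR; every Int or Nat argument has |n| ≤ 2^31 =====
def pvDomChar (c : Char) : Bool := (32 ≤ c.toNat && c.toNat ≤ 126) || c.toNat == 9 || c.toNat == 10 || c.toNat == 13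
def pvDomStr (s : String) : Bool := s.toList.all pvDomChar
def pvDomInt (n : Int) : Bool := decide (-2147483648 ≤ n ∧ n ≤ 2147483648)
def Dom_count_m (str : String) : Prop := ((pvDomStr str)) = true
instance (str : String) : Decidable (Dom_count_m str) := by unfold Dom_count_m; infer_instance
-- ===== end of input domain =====

-- B is an alternative decomposition of the same O(n) task: a triple-window scan for a
-- vowel run of length 3, else a backwards count of the trailing vowel run.

-- ===== PORT A =====
-- A: one loop with a counter cnt, early return when cnt >= 3.
def count_m_go : List Char → Int → Int
  | [], cnt => cnt
  | c :: rest, cnt =>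
    if cnt ≥ 3 then cnt
    else if (['a', 'e', 'i', 'o', 'u'] : List Char).contains c then
      count_m_go rest (cnt + 1)
    else
      count_m_go rest 0

def count_m (str : String) : Int := count_m_go str.toList 0

-- ===== PORT B =====
def isVowel (c : Char) : Bool := c == 'a' || c == 'e' || c == 'i' || c == 'o' || c == 'u'

-- any(...) over zip(str, str[1:], str[2:]): scan consecutive triples
def hasTriple : List Char → Bool
  | a :: b :: c :: rest => (isVowel a && isVowel b && isVowel c) || hasTriple (b :: c :: rest)
  | _ => false
  termination_by l => l.length

-- for c in reversed(str): count vowels until first non-vowel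
def tailRun : List Char → Int
  | [] => 0
  | c :: rest => if isVowel c then 1 + tailRun rest else 0

def count_m_alt (str : String) : Int :=
  if hasTriple str.toList then 3 else tailRun str.toList.reverse

-- ===== PRECONDITION & SPEC =====
def Spec_count_m (str : String) (out : Int) : Prop := out = count_m_alt str
instance (str : String) (out : Int) : Decidable (Spec_count_m str out) := by unfold Spec_count_m; infer_instance

-- ===== CLAIM (what is proved, stated in full; the proofs are below) =====
def Claim_equal_count_m : Prop := ∀ (str : String), Dom_count_m str → Spec_count_m str (count_m str)

-- ===== LEMMAS AND PROOFS =====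

-- proof-only helpers: the two aspects of A's loop, tracked separately
def reach : Nat → List Char → Bool
  | _, [] => false
  | k, c :: r => if isVowel c then (k == 2) || reach (k + 1) r else reach 0 r

def tailK : Nat → List Char → Int
  | k, [] => (k : Int)
  | k, c :: r => if isVowel c then tailK (k + 1) r else tailK 0 r

theorem containsVowels_eq (c : Char) :
    (['a', 'e', 'i', 'o', 'u'] : List Char).contains c = isVowel c := by
  unfold isVowel
  cases h1 : (c == 'a') <;> cases h2 : (c == 'e') <;> cases h3 : (c == 'i') <;>
    cases h4 : (c == 'o') <;> cases h5 : (c == 'u') <;>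
    simp [List.contains, List.elem, h1, h2, h3, h4, h5]

theorem isVowel_a : isVowel 'a' = true := by decide

theorem go_three (l : List Char) : count_m_go l 3 = 3 := by
  cases l <;> simp [count_m_go]

theorem go_cons (c : Char) (r : List Char) (cnt : Int) (h : ¬ cnt ≥ 3) :
    count_m_go (c :: r) cnt =
      if isVowel c then count_m_go r (cnt + 1) else count_m_go r 0 := by
  simp only [count_m_go, containsVowels_eq, if_neg h]

theorem go_char (l : List Char) (k : Nat) (hk : k ≤ 2) :
    count_m_go l (k : Int) = if reach k l then 3 else tailK k l := by
  induction l generalizing k with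
  | nil => simp [count_m_go, reach, tailK]
  | cons c r ih =>
    have h3 : ¬ ((k : Int) ≥ 3) := by omega
    rw [go_cons c r _ h3]
    cases hv : isVowel c with
    | true =>
      by_cases hk2 : k = 2
      · subst hk2
        rw [if_pos rfl, show ((2 : Nat) : Int) + 1 = 3 by norm_num, go_three]
        simp [reach, hv]
      · have hk1 : k + 1 ≤ 2 := by omega
        rw [if_pos rfl, show ((k : Int) + 1) = ((k + 1 : Nat) : Int) by push_cast; ring,
          ih _ hk1]
        simp [reach, hv, hk2, tailK]
    | false =>
      rw [if_neg (by simp),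
        show (0 : Int) = ((0 : Nat) : Int) from rfl, ih 0 (by omega)]
      simp [reach, hv, tailK]

-- hasTriple depends on the head only through isVowel
theorem hasTriple_head_congr (c c' : Char) (t : List Char) (h : isVowel c = isVowel c') :
    hasTriple (c :: t) = hasTriple (c' :: t) := by
  match t with
  | [] => simp [hasTriple]
  | [x] => simp [hasTriple]
  | x :: y :: r => simp only [hasTriple, h]

theorem hasTriple_notV_cons (c : Char) (r : List Char) (h : isVowel c = false) :
    hasTriple (c :: r) = hasTriple r := by
  match r with
  | [] => simp [hasTriple]
  | [x] => simp [hasTriple]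
  | x :: y :: t => simp only [hasTriple, h, Bool.false_and, Bool.false_or]

theorem hasTriple_snd_notV (x c : Char) (r : List Char) (h : isVowel c = false) :
    hasTriple (x :: c :: r) = hasTriple r := by
  match r with
  | [] => simp [hasTriple]
  | d :: r' =>
    simp only [hasTriple, h, Bool.and_false, Bool.false_and, Bool.false_or]
    exact hasTriple_notV_cons c (d :: r') h

theorem hasTriple_third_notV (x y c : Char) (r : List Char) (h : isVowel c = false) :
    hasTriple (x :: y :: c :: r) = hasTriple (y :: c :: r) := by
  simp only [hasTriple, h, Bool.and_false, Bool.false_or]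

theorem reach_eq_hasTriple (l : List Char) (k : Nat) (hk : k ≤ 2) :
    reach k l = hasTriple (List.replicate k 'a' ++ l) := by
  induction l generalizing k with
  | nil =>
    interval_cases k <;> simp [reach, hasTriple, List.replicate]
  | cons c r ih =>
    cases hv : isVowel c with
    | true =>
      interval_cases k
      · -- k = 0
        rw [show reach 0 (c :: r) = reach 1 r by simp [reach, hv]]
        rw [ih 1 (by omega)]
        simp only [List.replicate, List.nil_append, List.singleton_append]
        exact hasTriple_head_congr 'a' c r (by rw [hv, isVowel_a])
      · -- k = 1
        rw [show reach 1 (c :: r) = reach 2 r by simp [reach, hv]]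
        rw [ih 2 (by omega)]
        simp only [List.replicate, List.nil_append, List.cons_append]
        match r with
        | [] => simp [hasTriple]
        | d :: r' =>
          simp only [hasTriple, isVowel_a, hv, Bool.true_and]
          rw [hasTriple_head_congr c 'a' (d :: r') (by rw [hv, isVowel_a])]
      · -- k = 2
        simp only [List.replicate, List.nil_append, List.cons_append]
        simp only [reach, hv, if_true, Nat.reduceBEq] -- reach 2 (c::r) with isVowel c: k==2 true
        simp [hasTriple, isVowel_a, hv]
    | false =>
      rw [show reach k (c :: r) = reach 0 r by simp [reach, hv]]
      rw [ih 0 (by omega)]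
      have h0 : hasTriple (c :: r) = hasTriple r := hasTriple_notV_cons c r hv
      interval_cases k
      · simp [h0]
      · simp only [List.replicate, List.nil_append, List.singleton_append]
        rw [hasTriple_snd_notV 'a' c r hv]
      · simp only [List.replicate, List.nil_append, List.cons_append]
        rw [hasTriple_third_notV 'a' 'a' c r hv, hasTriple_snd_notV 'a' c r hv]

theorem tailRun_replicate (k : Nat) : tailRun (List.replicate k 'a') = (k : Int) := by
  induction k with
  | zero => simp [tailRun]
  | succ n ih => simp [List.replicate, tailRun, isVowel_a, ih]; ring

theorem tailRun_append_notV (xs ys : List Char) (c : Char) (h : isVowel c = false) :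
    tailRun (xs ++ c :: ys) = tailRun xs := by
  induction xs with
  | nil => simp [tailRun, h]
  | cons x t ih =>
    cases hx : isVowel x <;> simp [tailRun, hx, ih]

theorem tailRun_congr (xs ys : List Char) (h : xs.map isVowel = ys.map isVowel) :
    tailRun xs = tailRun ys := by
  induction xs generalizing ys with
  | nil =>
    cases ys with
    | nil => rfl
    | cons y t => simp at h
  | cons x t ih =>
    cases ys with
    | nil => simp at h
    | cons y s =>
      simp only [List.map_cons, List.cons.injEq] at h
      simp only [tailRun, h.1, ih s h.2]

theorem tailK_eq_tailRun (l : List Char) (k : Nat) :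
    tailK k l = tailRun (l.reverse ++ List.replicate k 'a') := by
  induction l generalizing k with
  | nil => simp [tailK, tailRun_replicate]
  | cons c r ih =>
    cases hv : isVowel c with
    | true =>
      rw [show tailK k (c :: r) = tailK (k + 1) r by simp [tailK, hv]]
      rw [ih (k + 1)]
      apply tailRun_congr
      simp only [List.reverse_cons, List.append_assoc, List.map_append]
      rw [show List.replicate (k + 1) 'a' = 'a' :: List.replicate k 'a' from rfl]
      simp [isVowel_a, hv]
    | false =>
      rw [show tailK k (c :: r) = tailK 0 r by simp [tailK, hv]]
      rw [ih 0]
      simp only [List.replicate, List.append_nil, List.reverse_cons, List.append_assoc,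
        List.singleton_append]
      rw [tailRun_append_notV r.reverse (List.replicate k 'a') c hv]

-- ===== VERDICT (by name: the statement is the Claim_ definition above) =====
theorem count_m_spec : Claim_equal_count_m := by
  intro str _
  unfold Spec_count_m count_m count_m_alt
  rw [show (0 : Int) = ((0 : Nat) : Int) from rfl, go_char str.toList 0 (by omega),
    reach_eq_hasTriple str.toList 0 (by omega), tailK_eq_tailRun str.toList 0]
  simp
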